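-- pv_equiv track=rewrite | github.com/nadya02/Bachelor-Thesis-Project | simpleSelfAttention.py | create_fixed_batches
-- ===== SOURCE A (Python) =====
-- def create_fixed_batches(reviews, labels, batch_size, max_seq_length, pad_index):
--     batches = []
--     for i in range(0, len(reviews), batch_size):
--         batch_reviews = reviews[i:i+batch_size]
--         batch_labels = labels[i:i+batch_size]
--         padded_reviews = [review[:max_seq_length] + [pad_index] * max(0, max_seq_length - len(review)) for review in batch_reviews]
--         batches.append((padded_reviews, batch_labels))
--     return batches
-- ===== SOURCE B (Python) =====
-- def create_fixed_batches(reviews, labels, batch_size, max_seq_length, pad_index):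
--     if batch_size <= 0:
--         return []
--     padded = [r[:max_seq_length] + [pad_index] * (max_seq_length - len(r)) for r in reviews]
--     batches = []
--     while padded:
--         batches.append((padded[:batch_size], labels[:batch_size]))
--         padded = padded[batch_size:]
--         labels = labels[batch_size:]
--     return batches
-- ===== Notes on version B (the rewrite author's own statement) =====
-- stated objective: alternative
-- what changed: B pads the whole review list once up front, then consumes the padded list and the labels with a while loop that repeatedly takes and drops a batch_size prefix, instead of A's index-range loop that slices and pads inside each iteration.
import Mathlib
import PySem

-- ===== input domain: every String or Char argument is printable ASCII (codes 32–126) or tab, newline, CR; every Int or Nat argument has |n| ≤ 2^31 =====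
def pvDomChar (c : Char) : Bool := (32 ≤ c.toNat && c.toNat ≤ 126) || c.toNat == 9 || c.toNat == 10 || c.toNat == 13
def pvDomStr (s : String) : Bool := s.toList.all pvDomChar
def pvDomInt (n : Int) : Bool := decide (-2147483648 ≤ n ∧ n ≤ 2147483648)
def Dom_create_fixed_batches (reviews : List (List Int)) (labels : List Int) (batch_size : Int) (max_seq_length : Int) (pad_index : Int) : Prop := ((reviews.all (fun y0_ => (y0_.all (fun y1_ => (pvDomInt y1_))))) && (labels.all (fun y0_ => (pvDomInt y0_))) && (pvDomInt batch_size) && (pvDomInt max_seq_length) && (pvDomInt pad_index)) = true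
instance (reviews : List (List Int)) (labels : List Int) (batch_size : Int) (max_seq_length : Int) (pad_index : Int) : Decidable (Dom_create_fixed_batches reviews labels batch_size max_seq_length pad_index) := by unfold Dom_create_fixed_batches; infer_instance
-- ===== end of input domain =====

-- B pads the whole review list once up front and then chunks the padded list and the labels by
-- repeated take/drop of a batch_size prefix, instead of A's index-range loop that slices and pads
-- per batch (alternative decomposition, same asymptotic cost).

-- ===== PORT A =====
def create_fixed_batches (reviews : List (List Int)) (labels : List Int) (batch_size : Int) (max_seq_length : Int) (pad_index : Int) : List (List (List Int) × List Int) :=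
  (PySem.List.pyRange 0 (reviews.length : Int) batch_size).foldl
    (fun batches i =>
      let batch_reviews := PySem.List.slice reviews (some i) (some (i + batch_size))
      let batch_labels := PySem.List.slice labels (some i) (some (i + batch_size))
      let padded_reviews := batch_reviews.map (fun review =>
        PySem.List.slice review none (some max_seq_length) ++
          PySem.List.pyRepeat [pad_index] (max 0 (max_seq_length - (review.length : Int))))
      batches ++ [(padded_reviews, batch_labels)]) []

-- ===== PORT B =====
-- the while loop of Source B: emit (padded[:bs], labels[:bs]) and drop those prefixes until padded is empty;
-- 'r.drop (bs - 1)' is '(x :: r).drop bs' written on the tail so the recursion is visibly decreasing (bs ≥ 1 when called).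
def pvChunk {α β : Type} (bs : Nat) : List α → List β → List (List α × List β)
  | [], _ => []
  | x :: r, ys => ((x :: r).take bs, ys.take bs) :: pvChunk bs (r.drop (bs - 1)) (ys.drop bs)
  termination_by xs _ => xs.length
  decreasing_by simp

def create_fixed_batches_alt (reviews : List (List Int)) (labels : List Int) (batch_size : Int) (max_seq_length : Int) (pad_index : Int) : List (List (List Int) × List Int) :=
  if batch_size ≤ 0 then []
  else
    pvChunk batch_size.toNat
      (reviews.map (fun r =>
        PySem.List.slice r none (some max_seq_length) ++
          PySem.List.pyRepeat [pad_index] (max_seq_length - (r.length : Int))))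
      labels

-- ===== PRECONDITION & SPEC =====
-- Pre_ excludes only batch_size = 0, where Python A raises ValueError (range() with step 0).
def Pre_create_fixed_batches (reviews : List (List Int)) (labels : List Int) (batch_size : Int) (max_seq_length : Int) (pad_index : Int) : Prop := batch_size ≠ 0
instance (reviews : List (List Int)) (labels : List Int) (batch_size : Int) (max_seq_length : Int) (pad_index : Int) : Decidable (Pre_create_fixed_batches reviews labels batch_size max_seq_length pad_index) := by unfold Pre_create_fixed_batches; infer_instance

def pvWitness_create_fixed_batches : List (List Int) × List Int × Int × Int × Int := ([[1, 2, 3], [4], [5, 6]], [1, 0, 1], 2, 2, 9)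

def Spec_create_fixed_batches (reviews : List (List Int)) (labels : List Int) (batch_size : Int) (max_seq_length : Int) (pad_index : Int) (out : List (List (List Int) × List Int)) : Prop := out = create_fixed_batches_alt reviews labels batch_size max_seq_length pad_index
instance (reviews : List (List Int)) (labels : List Int) (batch_size : Int) (max_seq_length : Int) (pad_index : Int) (out : List (List (List Int) × List Int)) : Decidable (Spec_create_fixed_batches reviews labels batch_size max_seq_length pad_index out) := by unfold Spec_create_fixed_batches; infer_instance

-- ===== CLAIM (what is proved, stated in full; the proofs are below) =====
def Claim_equal_create_fixed_batches : Prop := ∀ (reviews : List (List Int)) (labels : List Int) (batch_size : Int) (max_seq_length : Int) (pad_index : Int), Dom_create_fixed_batches reviews labels batch_size max_seq_length pad_index → Pre_create_fixed_batches reviews labels batch_size max_seq_length pad_index → Spec_create_fixed_batches reviews labels batch_size max_seq_length pad_index (create_fixed_batches reviews labels batch_size max_seq_length pad_index)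

-- ===== LEMMAS AND PROOFS =====

lemma pvToNatMax (a : Int) : (max 0 a).toNat = a.toNat := by omega

lemma pvPyRange_neg_empty (n : Nat) (s : Int) (hs : s < 0) : PySem.List.pyRange 0 (n : Int) s = [] := by
  have h0 : s ≠ 0 := by omega
  have h1 : ¬ (0 < s) := by omega
  have h2 : ¬ ((n : Int) < 0) := by omega
  simp [PySem.List.pyRange, h0, h1, h2]

lemma pvPyRange_pos_cons (a b s : Int) (hs : 0 < s) (h : a < b) :
    PySem.List.pyRange a b s = a :: PySem.List.pyRange (a + s) b s := by
  rw [PySem.List.pyRange_of_pos _ _ hs, PySem.List.pyRange_of_pos _ _ hs]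
  have hne : s ≠ 0 := by omega
  by_cases h2 : a + s < b
  · have hstep := Int.add_mul_ediv_right (b - (a + s) + s - 1) 1 hne
    rw [show b - (a + s) + s - 1 + 1 * s = b - a + s - 1 by ring] at hstep
    have hpos : 0 ≤ (b - (a + s) + s - 1) / s := Int.ediv_nonneg (by omega) (by omega)
    rw [if_pos h, if_pos h2, hstep]
    have : ((b - (a + s) + s - 1) / s + 1).toNat = ((b - (a + s) + s - 1) / s).toNat + 1 := by omega
    rw [this, List.range_succ_eq_map, List.map_cons, List.map_map]
    congr 1
    · simp
    · apply List.map_congr_left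
      intro k _
      simp [Function.comp]
      ring
  · have hone : (b - a + s - 1) / s = 1 := by
      have h1 : PySem.Int.floordiv (b - a + s - 1) s = 1 := by
        rw [PySem.Int.floordiv_eq_iff_of_pos hs]
        omega
      rw [PySem.Int.floordiv_eq_ediv_of_pos hs] at h1
      exact h1
    rw [if_pos h, if_neg h2, hone]
    simp

lemma pvPyRange_pos_shift (b s : Int) (hs : 0 < s) :
    PySem.List.pyRange s b s = (PySem.List.pyRange 0 (b - s) s).map (· + s) := by
  rw [PySem.List.pyRange_of_pos _ _ hs, PySem.List.pyRange_of_pos _ _ hs]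
  have hc : (if s < b then ((b - s + s - 1) / s).toNat else 0)
      = (if 0 < b - s then ((b - s - 0 + s - 1) / s).toNat else 0) := by
    have h1 : (s < b) ↔ (0 < b - s) := by omega
    have h2 : b - s + s - 1 = b - s - 0 + s - 1 := by ring
    rw [h2]
    by_cases h : 0 < b - s
    · rw [if_pos (h1.mpr h), if_pos h]
    · rw [if_neg (fun hh => h (h1.mp hh)), if_neg h]
  rw [hc, List.map_map]
  apply List.map_congr_left
  intro k _
  simp
  ring

lemma pvPyRange_zero_congr (s b c : Int) (hs : 0 < s) (h : b.toNat = c.toNat) :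
    PySem.List.pyRange 0 b s = PySem.List.pyRange 0 c s := by
  rw [PySem.List.pyRange_of_pos _ _ hs, PySem.List.pyRange_of_pos _ _ hs]
  congr 1
  by_cases hb : 0 < b
  · have hbc : b = c := by omega
    rw [hbc]
  · have hcn : ¬ 0 < c := by omega
    rw [if_neg (by omega), if_neg hcn]

lemma pvSliceMap {α β : Type} (f : α → β) (xs : List α) (a b : Int) (ha : 0 ≤ a) (hb : 0 ≤ b) :
    (PySem.List.slice xs (some a) (some b)).map f = PySem.List.slice (xs.map f) (some a) (some b) := by
  rw [PySem.List.slice_toNat xs ha hb, PySem.List.slice_toNat _ ha hb]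
  simp [List.map_take, List.map_drop]

lemma pvSliceShift {α : Type} (xs : List α) (i s : Int) (hi : 0 ≤ i) (hs : 0 ≤ s) :
    PySem.List.slice xs (some (i + s)) (some (i + s + s))
      = PySem.List.slice (xs.drop s.toNat) (some i) (some (i + s)) := by
  rw [PySem.List.slice_toNat _ (by omega) (by omega), PySem.List.slice_toNat _ hi (by omega),
    List.drop_drop]
  congr 1
  · omega
  · congr 1
    omega

lemma pvLoopChunk {α β : Type} (s : Int) (hs : 0 < s) :
    ∀ (n : Nat) (xs : List α) (ys : List β) (acc : List (List α × List β)),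
      xs.length = n →
      (PySem.List.pyRange 0 (xs.length : Int) s).foldl
        (fun acc i => acc ++ [(PySem.List.slice xs (some i) (some (i + s)),
                               PySem.List.slice ys (some i) (some (i + s)))]) acc
      = acc ++ pvChunk s.toNat xs ys := by
  intro n
  induction n using Nat.strong_induction_on with
  | _ n ih =>
    intro xs ys acc hn
    match xs with
    | [] => simp [pvChunk.eq_1, PySem.List.pyRange_of_pos _ _ hs]
    | x :: r =>
      have hlen : (0 : Int) < ((x :: r).length : Int) := by
        simp
      rw [pvPyRange_pos_cons _ _ _ hs hlen, List.foldl_cons, zero_add]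
      rw [pvPyRange_pos_shift _ _ hs, List.foldl_map]
      rw [PySem.List.foldl_congr_mem _ _
        (fun acc i => acc ++ [(PySem.List.slice ((x :: r).drop s.toNat) (some i) (some (i + s)),
                               PySem.List.slice (ys.drop s.toNat) (some i) (some (i + s)))]) _
        (by
          intro acc' i hmem
          have hi : 0 ≤ i := ((PySem.List.mem_pyRange_iff_of_pos hs i).mp hmem).1
          rw [pvSliceShift _ _ _ hi hs.le, pvSliceShift _ _ _ hi hs.le])]
      rw [pvPyRange_zero_congr s _ ((((x :: r).drop s.toNat).length : Nat) : Int) hs (by simp; omega)]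
      have hlt : ((x :: r).drop s.toNat).length < n := by
        simp at hn ⊢
        omega
      rw [ih _ hlt ((x :: r).drop s.toNat) (ys.drop s.toNat) _ rfl]
      have hdrop : (x :: r).drop s.toNat = r.drop (s.toNat - 1) := by
        obtain ⟨k, hk⟩ : ∃ k, s.toNat = k + 1 := ⟨s.toNat - 1, by omega⟩
        rw [hk, List.drop_succ_cons]
        simp
      have hfirst : PySem.List.slice (x :: r) (some 0) (some s) = (x :: r).take s.toNat := by
        rw [PySem.List.slice_zero_start, PySem.List.slice_to _ hs.le]
      have hfirst2 : PySem.List.slice ys (some 0) (some s) = ys.take s.toNat := by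
        rw [PySem.List.slice_zero_start, PySem.List.slice_to _ hs.le]
      rw [hfirst, hfirst2, hdrop, pvChunk.eq_2]
      simp

-- ===== VERDICT (by name: the statement is the Claim_ definition above) =====
theorem create_fixed_batches_spec : Claim_equal_create_fixed_batches := by
  intro reviews labels batch_size max_seq_length pad_index _ hpre
  unfold Pre_create_fixed_batches at hpre
  unfold Spec_create_fixed_batches create_fixed_batches create_fixed_batches_alt
  by_cases hneg : batch_size ≤ 0
  · have hlt : batch_size < 0 := by omega
    rw [if_pos hneg, pvPyRange_neg_empty _ _ hlt]
    rfl
  · have hpos : 0 < batch_size := by omega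
    rw [if_neg hneg]
    simp only []
    -- rewrite A's per-batch padding map into a slice of the globally padded list
    rw [PySem.List.foldl_congr_mem _ _
      (fun batches i => batches ++
        [(PySem.List.slice (reviews.map (fun r =>
            PySem.List.slice r none (some max_seq_length) ++
              PySem.List.pyRepeat [pad_index] (max_seq_length - (r.length : Int))))
            (some i) (some (i + batch_size)),
          PySem.List.slice labels (some i) (some (i + batch_size)))]) _
      (by
        intro acc i hmem
        have hi : 0 ≤ i := ((PySem.List.mem_pyRange_iff_of_pos hpos i).mp hmem).1
        simp only [PySem.List.pyRepeat_singleton, pvToNatMax]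
        rw [pvSliceMap _ _ _ _ hi (by omega)])]
    have hlen : ((reviews.length : Nat) : Int)
        = (((reviews.map (fun r =>
            PySem.List.slice r none (some max_seq_length) ++
              PySem.List.pyRepeat [pad_index] (max_seq_length - (r.length : Int)))).length : Nat) : Int) := by
      simp
    rw [hlen, pvLoopChunk batch_size hpos _ _ labels [] rfl]
    rfl
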